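-- pv_equiv track=rewrite | github.com/saierding/target-offer | target offer 10.py | print_maxnumber
-- ===== SOURCE A (Python) =====
-- def print_maxnumber(n):
--     i = 0
--     count = 1
--     while i < n:
--         count *= 10
--         i += 1
--     for i in range(count):
--         pass
--     return i
-- ===== SOURCE B (Python) =====
-- def print_maxnumber(n):
--     # Closed form: the largest n-digit number is 10**n - 1; for n <= 0 the answer is 0.
--     return 10 ** n - 1 if n > 0 else 0
-- ===== Notes on version B (the rewrite author's own statement) =====
-- stated objective: simpler
-- what changed: Replaced the 10^n-step counting loops (a multiply-while plus an empty for over range(10^n)) with the closed form 10**n - 1 (0 for n <= 0).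
import Mathlib
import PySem

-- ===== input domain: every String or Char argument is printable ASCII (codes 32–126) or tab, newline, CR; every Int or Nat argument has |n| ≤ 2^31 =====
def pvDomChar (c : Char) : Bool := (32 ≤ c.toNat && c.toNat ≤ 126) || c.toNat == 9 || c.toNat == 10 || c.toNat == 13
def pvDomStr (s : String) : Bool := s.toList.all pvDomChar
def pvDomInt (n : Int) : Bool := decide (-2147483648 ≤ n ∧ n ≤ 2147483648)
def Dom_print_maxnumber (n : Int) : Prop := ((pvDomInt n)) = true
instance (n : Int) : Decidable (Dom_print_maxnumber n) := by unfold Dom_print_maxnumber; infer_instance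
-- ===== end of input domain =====

-- B replaces A's counting loops (a multiply-while plus an empty for over range(10^n)) with the closed form 10^n - 1 (0 for n <= 0): simpler.


-- ===== PORT A =====
-- 'while i < n: count *= 10; i += 1' — returns the final (i, count)
def pvWhileA (n i count : Int) : Int × Int :=
  if _h : i < n then pvWhileA n (i + 1) (count * 10) else (i, count)
  termination_by (n - i).toNat
  decreasing_by omega

def print_maxnumber (n : Int) : Int :=
  match pvWhileA n 0 1 with
  | (i, count) =>
    -- 'for i in range(count): pass; return i' — i is the last element of range(count)
    -- (if the range were empty, i would keep its while-loop value)
    match (PySem.List.pyRange 0 count 1).getLast? with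
    | some j => j
    | none => i

-- ===== PORT B =====
def print_maxnumber_alt (n : Int) : Int :=
  if 0 < n then 10 ^ n.toNat - 1 else 0

-- ===== PRECONDITION & SPEC =====
def Spec_print_maxnumber (n : Int) (out : Int) : Prop := out = print_maxnumber_alt n
instance (n : Int) (out : Int) : Decidable (Spec_print_maxnumber n out) := by unfold Spec_print_maxnumber; infer_instance

-- ===== CLAIM (what is proved, stated in full; the proofs are below) =====
def Claim_equal_print_maxnumber : Prop := ∀ (n : Int), Dom_print_maxnumber n → Spec_print_maxnumber n (print_maxnumber n)

-- ===== LEMMAS AND PROOFS =====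

-- the while loop yields (n, count * 10^(n-i)) when i ≤ n, and (i, count) otherwise
theorem pvWhileA_eq (n i count : Int) (h : i ≤ n) :
    pvWhileA n i count = (n, count * 10 ^ (n - i).toNat) := by
  by_cases hlt : i < n
  · rw [pvWhileA]
    simp only [hlt, dif_pos]
    rw [pvWhileA_eq n (i + 1) (count * 10) (by omega)]
    have : (n - i).toNat = (n - (i + 1)).toNat + 1 := by omega
    rw [this, pow_succ]
    ring_nf
  · have : i = n := le_antisymm h (by omega)
    subst this
    rw [pvWhileA]
    simp
  termination_by (n - i).toNat
  decreasing_by omega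

theorem getLast?_pyRange (c : Int) (hc : 0 < c) :
    (PySem.List.pyRange 0 c 1).getLast? = some (c - 1) := by
  rw [PySem.List.pyRange_one]
  have hlen : (c - 0).toNat = (c - 0).toNat - 1 + 1 := by omega
  rw [hlen, List.range_succ]
  simp
  omega

theorem print_maxnumber_closed (n : Int) :
    print_maxnumber n = if 0 < n then 10 ^ n.toNat - 1 else 0 := by
  unfold print_maxnumber
  by_cases hn : 0 < n
  · rw [pvWhileA_eq n 0 1 (by omega)]
    dsimp only
    rw [getLast?_pyRange _ (by positivity)]
    rw [if_pos hn]
    have h : (n - 0).toNat = n.toNat := by omega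
    rw [h]; ring
  · rw [pvWhileA, dif_neg hn]
    dsimp only
    rw [getLast?_pyRange 1 (by omega)]
    simp [hn]

-- ===== VERDICT (by name: the statement is the Claim_ definition above) =====
theorem print_maxnumber_spec : Claim_equal_print_maxnumber := by
  intro n _
  unfold Spec_print_maxnumber print_maxnumber_alt
  rw [print_maxnumber_closed]
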